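-- pv_equiv track=rewrite | github.com/NicoNeureiter/sBayes | sbayes/tools/guess_feature_types.py | guess_feature_type
-- ===== SOURCE A (Python) =====
-- def is_number(s):
--     """Helper function to check if a string is a number
--     :param s: string to check
--     :return(bool) is s a number
--     """
--     try:
--         float(s)
--         return True
--     except ValueError:
--         return False
--
-- def is_integer(s):
--     """Helper function to check if a string is an integer
--     :param s: string to check
--     :return(bool) is s an integer?
--     """
--     try:
--         int(s)
--         return True
--     except ValueError:
--         return False
--
-- def is_binary_integer(s):
--     """Helper function to check if a string is a binary integer
--     :param s: string to check
--     :return(bool) is s a binary integer?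
--     """
--     try:
--         if int(s) == 0 or int(s) == 1:
--             return True
--         else:
--             return False
--     except ValueError:
--         return False
--
-- def is_percentage(s):
--     """Helper function to check if a string is a percentage
--     :param s: string to check
--     :return(bool) is s an integer
--     """
--     try:
--         if 0 < float(s) < 1:
--             return True
--         else:
--             return False
--     except ValueError:
--         return False
--
-- def guess_feature_type(f):
--     """ Guesses the type of the features in f
--     categorical: observations belong to two or more categories
--     gaussian: observations are continuous measurements
--     poisson: observations are count variables
--     logit-normal: observations are percentages
--     :param f: feature vector
--     :return type guess for each feature vector
--     """
--     if not all(is_number(o) for o in f):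
--         type_guess = "categorical"
--     else:
--         if all(is_integer(o) for o in f):
--             if all(is_binary_integer(o) for o in f):
--                 type_guess = "categorical"
--             else:
--                 type_guess = "poisson"
--         else:
--             if all(is_percentage(o) for o in f):
--                 type_guess = "logit-normal"
--             else:
--                 type_guess = "gaussian"
--     return type_guess
-- ===== SOURCE B (Python) =====
-- def guess_feature_type(f):
--     """One pass over f, parsing each element ONCE (one float(), one int()) instead of
--     A's up-to-four all() passes with up-to-seven parses per element; returns early on
--     the first non-number and reads the answer from the three remaining flags."""
--     all_int = all_bin = all_pct = True
--     for o in f: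
--         try:
--             x = float(o)
--         except ValueError:
--             return "categorical"
--         try:
--             n = int(o)
--             all_bin = all_bin and (n == 0 or n == 1)
--         except ValueError:
--             all_int = False
--         all_pct = all_pct and 0 < x < 1
--     if all_int:
--         return "categorical" if all_bin else "poisson"
--     return "logit-normal" if all_pct else "gaussian"
-- ===== Notes on version B (the rewrite author's own statement) =====
-- stated objective: alternative
-- what changed: A runs up to four separate short-circuiting all() passes over f, each re-parsing every element with its own try/except predicate (up to 3 float() and 4 int() parses per element); B makes ONE pass, parsing each element exactly once (one float(), one int()), returns early on the first non-number, and reads the answer from three maintained flags.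
import Mathlib
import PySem

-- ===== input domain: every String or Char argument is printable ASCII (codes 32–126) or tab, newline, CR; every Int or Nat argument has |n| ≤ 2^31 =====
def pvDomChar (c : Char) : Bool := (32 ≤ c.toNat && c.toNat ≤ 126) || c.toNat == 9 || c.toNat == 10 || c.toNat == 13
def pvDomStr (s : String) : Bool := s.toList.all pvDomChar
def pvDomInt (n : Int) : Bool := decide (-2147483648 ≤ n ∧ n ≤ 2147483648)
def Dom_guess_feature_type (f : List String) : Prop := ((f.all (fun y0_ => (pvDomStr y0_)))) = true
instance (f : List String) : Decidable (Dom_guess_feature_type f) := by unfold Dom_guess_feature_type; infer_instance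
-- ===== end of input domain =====

-- B makes ONE pass over f, parsing each element once and returning early on the first
-- non-number, instead of A's up-to-four all() passes with several parses per element
-- (objective: alternative decomposition).

-- Python's float(str) has no PySem primitive; both ports hand-port it exactly on ASCII:
-- strip whitespace, optional sign, inf/infinity/nan case-insensitively, digits with single
-- underscores between digits, optional '.', optional exponent; a finite value is kept as the
-- exact pair (mantissa, decimal exponent).  The only float COMPARISON either program makes is
-- 0 < float(s) < 1, decided on the correctly-rounded binary64 value: round(v) > 0 iff
-- v > 2^-1075 and round(v) < 1 iff v < 1 - 2^-54 (ties-to-even), turned into the exact integer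
-- tests on (mantissa, exponent) used by pvIsPct / bPct below.
inductive PVFloat where
  | inf : Bool → PVFloat          -- true = negative
  | nan : PVFloat
  | finite : Int → Int → PVFloat  -- value = mantissa * 10 ^ exponent
deriving DecidableEq, Repr

-- ===== PORT A ===== (recursive-descent parse; four predicates; four all() passes)

-- run of digits with single '_' allowed between digits; returns (value, digit count, rest)
def pvDigRun : List Char → Nat → Nat → Nat × Nat × List Char
  | [], acc, cnt => (acc, cnt, [])
  | c :: rest, acc, cnt =>
    if PySem.Chars.isdigit c then pvDigRun rest (10 * acc + (c.toNat - 48)) (cnt + 1)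
    else if c = '_' then
      match rest with
      | d :: r2 =>
        if PySem.Chars.isdigit d then pvDigRun r2 (10 * acc + (d.toNat - 48)) (cnt + 1)
        else (acc, cnt, c :: rest)
      | [] => (acc, cnt, [c])
    else (acc, cnt, c :: rest)

-- a digit run must START with a digit (no leading '_')
def pvDigits (cs : List Char) : Nat × Nat × List Char :=
  match cs with
  | c :: rest =>
    if PySem.Chars.isdigit c then pvDigRun rest (c.toNat - 48) 1 else (0, 0, cs)
  | [] => (0, 0, [])

def pvLowerEq (cs : List Char) (t : List Char) : Bool :=
  cs.map PySem.Chars.lowerChar == t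

-- the exponent tail after 'e'/'E': optional sign, digit run, nothing after it
def pvExpTail (m : Nat) (fc : Nat) (r3 : List Char) : Option (Nat × Int) :=
  let (eneg, r4) :=
    match r3 with
    | '+' :: r => (false, r)
    | '-' :: r => (true, r)
    | _ => (false, r3)
  let (ev, ec, r5) := pvDigits r4
  if ec = 0 ∨ r5 ≠ [] then none
  else some (m, (if eneg then -(ev : Int) else (ev : Int)) - (fc : Int))

-- what may follow the mantissa: end of string or an exponent
def pvAfter (m : Nat) (fc : Nat) (r2 : List Char) : Option (Nat × Int) :=
  match r2 with
  | [] => some (m, -(fc : Int))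
  | e :: r3 => if e = 'e' ∨ e = 'E' then pvExpTail m fc r3 else none

-- numeric body after sign: int digits, optional '.' + frac digits, optional exponent
def pvBody (cs : List Char) : Option (Nat × Int) :=
  let (ip, ic, r1) := pvDigits cs
  let (fr, fc, r2) :=
    match r1 with
    | '.' :: r => pvDigits r
    | _ => (0, 0, r1)
  if ic + fc = 0 then none
  else pvAfter (ip * 10 ^ fc + fr) fc r2

def pvParseFloat (s : List Char) : Option PVFloat :=
  let cs := PySem.Chars.strip s
  let (neg, cs) :=
    match cs with
    | '+' :: r => (false, r)
    | '-' :: r => (true, r)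
    | _ => (false, cs)
  if pvLowerEq cs ['i','n','f'] || pvLowerEq cs ['i','n','f','i','n','i','t','y'] then
    some (.inf neg)
  else if pvLowerEq cs ['n','a','n'] then some .nan
  else
    match pvBody cs with
    | some (m, e) => some (.finite ((if neg then -1 else 1) * (m : Int)) e)
    | none => none

-- exact value of '0 < float(s) < 1' on the rounded binary64 (see header comment):
-- round(m*10^e) > 0 iff m*10^e > 2^-1075, round(m*10^e) < 1 iff m*10^e < 1 - 2^-54
def pvIsPct (v : Option PVFloat) : Bool :=
  match v with
  | some (.finite m e) =>
    0 < m &&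
      (if 0 ≤ e then false
       else 10 ^ (-e).toNat < m * 2 ^ 1075 && m * 2 ^ 54 < (2 ^ 54 - 1) * 10 ^ (-e).toNat)
  | _ => false

def is_number (s : String) : Bool := (pvParseFloat s.toList).isSome

def is_integer (s : String) : Bool := (PySem.Int.ofStr? s).isSome

def is_binary_integer (s : String) : Bool :=
  match PySem.Int.ofStr? s with
  | some n => if n == 0 || n == 1 then true else false
  | none => false

def is_percentage (s : String) : Bool := pvIsPct (pvParseFloat s.toList)

def guess_feature_type (f : List String) : String :=
  if ¬ (f.all fun o => is_number o) then "categorical"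
  else
    if f.all fun o => is_integer o then
      if f.all fun o => is_binary_integer o then "categorical" else "poisson"
    else
      if f.all fun o => is_percentage o then "logit-normal" else "gaussian"

-- ===== PORT B ===== (table-driven DFA over the characters; one flag-carrying loop)

-- DFA states for the numeric body 'digits [. digits] [e [sign] digits]' with '_' between digits
inductive BSt where
  | fail : BSt
  | start : BSt
  | intg : Nat → BSt                          -- inside the integer digit run, mantissa so far
  | intU : Nat → BSt                          -- just read '_' inside the integer run
  | dotOnly : BSt                             -- leading '.', no digit seen yet
  | fracFirst : Nat → BSt                     -- '.' right after integer digits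
  | frac : Nat → Nat → BSt                    -- inside the fraction: mantissa, frac-digit count
  | fracU : Nat → Nat → BSt                   -- just read '_' inside the fraction
  | expStart : Nat → Nat → BSt                -- just read 'e'/'E'
  | expSign : Nat → Nat → Bool → BSt          -- just read the exponent sign
  | expDig : Nat → Nat → Bool → Nat → BSt     -- inside the exponent digit run
  | expU : Nat → Nat → Bool → Nat → BSt       -- just read '_' inside the exponent run
deriving Repr

def bStep (st : BSt) (c : Char) : BSt :=
  let d := c.toNat - 48
  match st with
  | .start =>
      if PySem.Chars.isdigit c then .intg d else if c = '.' then .dotOnly else .fail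
  | .intg m =>
      if PySem.Chars.isdigit c then .intg (10 * m + d)
      else if c = '_' then .intU m
      else if c = '.' then .fracFirst m
      else if c = 'e' ∨ c = 'E' then .expStart m 0
      else .fail
  | .intU m => if PySem.Chars.isdigit c then .intg (10 * m + d) else .fail
  | .dotOnly => if PySem.Chars.isdigit c then .frac d 1 else .fail
  | .fracFirst m =>
      if PySem.Chars.isdigit c then .frac (10 * m + d) 1
      else if c = 'e' ∨ c = 'E' then .expStart m 0
      else .fail
  | .frac m fc =>
      if PySem.Chars.isdigit c then .frac (10 * m + d) (fc + 1)
      else if c = '_' then .fracU m fc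
      else if c = 'e' ∨ c = 'E' then .expStart m fc
      else .fail
  | .fracU m fc => if PySem.Chars.isdigit c then .frac (10 * m + d) (fc + 1) else .fail
  | .expStart m fc =>
      if PySem.Chars.isdigit c then .expDig m fc false d
      else if c = '+' then .expSign m fc false
      else if c = '-' then .expSign m fc true
      else .fail
  | .expSign m fc neg => if PySem.Chars.isdigit c then .expDig m fc neg d else .fail
  | .expDig m fc neg ev =>
      if PySem.Chars.isdigit c then .expDig m fc neg (10 * ev + d)
      else if c = '_' then .expU m fc neg ev
      else .fail
  | .expU m fc neg ev => if PySem.Chars.isdigit c then .expDig m fc neg (10 * ev + d) else .fail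
  | .fail => .fail

-- accepting states and their (mantissa, decimal exponent)
def bFinish : BSt → Option (Nat × Int)
  | .intg m => some (m, 0)
  | .fracFirst m => some (m, 0)
  | .frac m fc => some (m, -(fc : Int))
  | .expDig m fc neg ev => some (m, (if neg then -(ev : Int) else (ev : Int)) - (fc : Int))
  | _ => none

def bSigned (neg : Bool) (body : List Char) : Option PVFloat :=
  if PySem.Chars.lower body = ['i','n','f'] ∨ PySem.Chars.lower body = ['i','n','f','i','n','i','t','y'] then
    some (.inf neg)
  else if PySem.Chars.lower body = ['n','a','n'] then some .nan
  else
    match bFinish (body.foldl bStep .start) with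
    | some (m, e) => some (.finite (if neg then -(m : Int) else (m : Int)) e)
    | none => none

def bParse (s : List Char) : Option PVFloat :=
  match PySem.Chars.strip s with
  | '+' :: r => bSigned false r
  | '-' :: r => bSigned true r
  | t => bSigned false t

-- 0 < float < 1 on the rounded binary64, as one exact integer condition (see header comment)
def bPct : PVFloat → Bool
  | .finite m e =>
      decide (0 < m ∧ e < 0 ∧ 10 ^ (-e).toNat < m * 2 ^ 1075 ∧
              m * 2 ^ 54 < (2 ^ 54 - 1) * 10 ^ (-e).toNat)
  | _ => false

-- the single flag-carrying loop: parse each element once, bail out on a non-number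
def bLoop : List String → Bool → Bool → Bool → String
  | [], ints, bins, pcts =>
      if ints then (if bins then "categorical" else "poisson")
      else if pcts then "logit-normal" else "gaussian"
  | o :: rest, ints, bins, pcts =>
      match bParse o.toList with
      | none => "categorical"
      | some v =>
        match PySem.Int.ofStr? o with
        | some n => bLoop rest ints (bins && (n == 0 || n == 1)) (pcts && bPct v)
        | none => bLoop rest false bins (pcts && bPct v)

def guess_feature_type_alt (f : List String) : String := bLoop f true true true

-- ===== PRECONDITION & SPEC =====
def Spec_guess_feature_type (f : List String) (out : String) : Prop := out = guess_feature_type_alt f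
instance (f : List String) (out : String) : Decidable (Spec_guess_feature_type f out) := by unfold Spec_guess_feature_type; infer_instance

-- ===== CLAIM (what is proved, stated in full; the proofs are below) =====
def Claim_equal_guess_feature_type : Prop := ∀ (f : List String), Dom_guess_feature_type f → Spec_guess_feature_type f (guess_feature_type f)

-- ===== LEMMAS AND PROOFS =====

lemma foldl_bStep_fail (cs : List Char) : cs.foldl bStep .fail = .fail := by
  induction cs with
  | nil => rfl
  | cons c rest ih => simpa [bStep] using ih

lemma pvDigRun_cnt (cs : List Char) (a k : Nat) : k ≤ (pvDigRun cs a k).2.1 := by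
  fun_induction pvDigRun cs a k <;> simp_all <;> omega

lemma expDig_eq (cs : List Char) (m fc : Nat) (neg : Bool) (ev k : Nat) :
    bFinish ((cs).foldl bStep (.expDig m fc neg ev)) =
      (let (ev', _, r5) := pvDigRun cs ev k
       if r5 ≠ [] then none
       else some (m, (if neg then -(ev' : Int) else (ev' : Int)) - (fc : Int))) := by
  fun_induction pvDigRun cs ev k <;>
    simp_all [List.foldl, bStep, bFinish, foldl_bStep_fail]

lemma expSign_eq (r : List Char) (m fc : Nat) (neg : Bool) :
    bFinish (r.foldl bStep (.expSign m fc neg)) =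
      (let (ev, ec, r5) := pvDigits r
       if ec = 0 ∨ r5 ≠ [] then none
       else some (m, (if neg then -(ev : Int) else (ev : Int)) - (fc : Int))) := by
  cases r with
  | nil => simp [bFinish, pvDigits]
  | cons c rest =>
    by_cases h : PySem.Chars.isdigit c
    · have hc := pvDigRun_cnt rest (c.toNat - 48) 1
      rcases hx : pvDigRun rest (c.toNat - 48) 1 with ⟨ev, ec, r5⟩
      rw [hx] at hc
      have hec : ¬ ec = 0 := by norm_num at hc; omega
      simp only [List.foldl, bStep, h, if_true, pvDigits]
      rw [expDig_eq rest m fc neg (c.toNat - 48) 1, hx]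
      simp [hec]
    · simp [List.foldl, bStep, h, foldl_bStep_fail, bFinish, pvDigits]

lemma expStart_eq (r3 : List Char) (m fc : Nat) :
    bFinish (r3.foldl bStep (.expStart m fc)) = pvExpTail m fc r3 := by
  cases r3 with
  | nil => simp [bFinish, pvExpTail, pvDigits]
  | cons c rest =>
    by_cases h : PySem.Chars.isdigit c
    · have hp : c ≠ '+' := by rintro rfl; simp [PySem.Chars.isdigit] at h
      have hm : c ≠ '-' := by rintro rfl; simp [PySem.Chars.isdigit] at h
      have hc := pvDigRun_cnt rest (c.toNat - 48) 1
      rcases hx : pvDigRun rest (c.toNat - 48) 1 with ⟨ev, ec, r5⟩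
      rw [hx] at hc
      have hec : ¬ ec = 0 := by norm_num at hc; omega
      simp only [List.foldl, bStep, h, if_true, pvExpTail]
      rw [expDig_eq rest m fc false (c.toNat - 48) 1]
      rcases c with ⟨cv, hcv⟩
      simp_all [pvDigits]
    · by_cases hp : c = '+'
      · subst hp
        simp only [List.foldl, bStep, h]
        simpa [pvExpTail, bStep] using expSign_eq rest m fc false
      · by_cases hm : c = '-'
        · subst hm
          simp only [List.foldl, bStep, h]
          simpa [pvExpTail, bStep] using expSign_eq rest m fc true
        · rcases c with ⟨cv, hcv⟩
          simp_all [List.foldl, bStep, foldl_bStep_fail, bFinish, pvExpTail, pvDigits]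

lemma frac_eq (cs : List Char) (a c B fc0 : Nat) :
    bFinish (cs.foldl bStep (.frac (B * 10 ^ c + a) (fc0 + c))) =
      (let (v, t, r) := pvDigRun cs a c
       pvAfter (B * 10 ^ t + v) (fc0 + t) r) := by
  fun_induction pvDigRun cs a c with
  | case1 a _ => simp [bFinish, pvAfter]
  | case2 ch rest a c h ih =>
      have e1 : 10 * (B * 10 ^ c + a) + (ch.toNat - 48) = B * 10 ^ (c + 1) + (10 * a + (ch.toNat - 48)) := by ring
      have e2 : fc0 + c + 1 = fc0 + (c + 1) := by ring
      simpa [List.foldl, bStep, h, e1, e2] using ih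
  | case3 a c d r2 hnd hd ih =>
      have e1 : 10 * (B * 10 ^ c + a) + (d.toNat - 48) = B * 10 ^ (c + 1) + (10 * a + (d.toNat - 48)) := by ring
      have e2 : fc0 + c + 1 = fc0 + (c + 1) := by ring
      simpa [List.foldl, bStep, hnd, hd, e1, e2] using ih
  | case4 a c d r2 hnd hd =>
      simp_all [List.foldl, bStep, foldl_bStep_fail, bFinish, pvAfter]
  | case5 a c hnd => simp_all [List.foldl, bStep, bFinish, pvAfter]
  | case6 ch rest a c hnd hne =>
      by_cases he : ch = 'e' ∨ ch = 'E'
      · have hst : bStep (.frac (B * 10 ^ c + a) (fc0 + c)) ch = .expStart (B * 10 ^ c + a) (fc0 + c) := by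
          simp [bStep, hnd, hne, he]
        simp only [List.foldl, hst]
        simp [pvAfter, he, expStart_eq]
      · have hst : bStep (.frac (B * 10 ^ c + a) (fc0 + c)) ch = .fail := by
          simp [bStep, hnd, hne, he]
        simp [List.foldl, hst, foldl_bStep_fail, bFinish, pvAfter, he]

lemma fracFirst_eq (r : List Char) (m : Nat) :
    bFinish (r.foldl bStep (.fracFirst m)) =
      (let (fr, fc, r2) := pvDigits r
       pvAfter (m * 10 ^ fc + fr) fc r2) := by
  cases r with
  | nil => simp [bFinish, pvDigits, pvAfter]
  | cons c rest =>
    by_cases h : PySem.Chars.isdigit c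
    · have hstep : bStep (.fracFirst m) c = .frac (10 * m + (c.toNat - 48)) 1 := by
        simp [bStep, h]
      have hf := frac_eq rest (c.toNat - 48) 1 m 0
      have e1 : m * 10 ^ 1 + (c.toNat - 48) = 10 * m + (c.toNat - 48) := by ring
      rw [e1, Nat.zero_add] at hf
      simp only [List.foldl, hstep]
      rw [hf]
      simp [pvDigits, h]
    · by_cases he : c = 'e' ∨ c = 'E'
      · have hstep : bStep (.fracFirst m) c = .expStart m 0 := by simp [bStep, h, he]
        simp only [List.foldl, hstep]
        simp [pvDigits, h, pvAfter, he, expStart_eq]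
      · have hstep : bStep (.fracFirst m) c = .fail := by simp [bStep, h, he]
        simp [List.foldl, hstep, foldl_bStep_fail, bFinish, pvDigits, h, pvAfter, he]

lemma intg_eq (cs : List Char) (a c : Nat) :
    bFinish (cs.foldl bStep (.intg a)) =
      (let (v, t, r1) := pvDigRun cs a c
       match r1 with
       | '.' :: r =>
         (let (fr, fc, r2) := pvDigits r
          pvAfter (v * 10 ^ fc + fr) fc r2)
       | _ => pvAfter v 0 r1) := by
  fun_induction pvDigRun cs a c with
  | case1 a _ => simp [bFinish, pvAfter]
  | case2 ch rest a c h ih => simpa [List.foldl, bStep, h] using ih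
  | case3 a c d r2 hnd hd ih => simpa [List.foldl, bStep, hnd, hd] using ih
  | case4 a c d r2 hnd hd =>
      simp_all [List.foldl, bStep, foldl_bStep_fail, bFinish, pvAfter]
  | case5 a c hnd => simp_all [List.foldl, bStep, bFinish, pvAfter]
  | case6 ch rest a c hnd hne =>
      by_cases hdot : ch = '.'
      · subst hdot
        have hst : bStep (.intg a) '.' = .fracFirst a := by
          simp [bStep, show PySem.Chars.isdigit '.' = false from by decide]
        simp only [List.foldl, hst]
        simpa using fracFirst_eq rest a
      · by_cases he : ch = 'e' ∨ ch = 'E'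
        · have hst : bStep (.intg a) ch = .expStart a 0 := by simp [bStep, hnd, hne, hdot, he]
          simp only [List.foldl, hst]
          simp only [pvAfter, he, expStart_eq]
          split <;> simp_all
        · have hst : bStep (.intg a) ch = .fail := by simp [bStep, hnd, hne, hdot, he]
          simp only [List.foldl, hst, foldl_bStep_fail]
          split <;> simp_all [bFinish, pvAfter]

lemma body_eq (cs : List Char) : bFinish (cs.foldl bStep .start) = pvBody cs := by
  cases cs with
  | nil => simp [bFinish, pvBody, pvDigits]
  | cons c rest =>
    by_cases h : PySem.Chars.isdigit c
    · have hst : bStep .start c = .intg (c.toNat - 48) := by simp [bStep, h]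
      have hpd : pvDigits (c :: rest) = pvDigRun rest (c.toNat - 48) 1 := by
        simp [pvDigits, h]
      simp only [List.foldl, hst]
      rw [intg_eq rest (c.toNat - 48) 1]
      have hc := pvDigRun_cnt rest (c.toNat - 48) 1
      rcases hx : pvDigRun rest (c.toNat - 48) 1 with ⟨v, t, r1⟩
      rw [hx] at hc
      have ht : ¬ t = 0 := by norm_num at hc; omega
      simp only [pvBody, hpd, hx]
      rcases r1 with _ | ⟨c2, r⟩
      · simp [pvAfter, ht]
      · by_cases hdot2 : c2 = '.'
        · subst hdot2
          rcases hy : pvDigits r with ⟨fr, fc, r2⟩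
          simp [hy, ht]
        · split
          · simp_all
          · split
            · simp_all
            · simp [pvAfter]
    · by_cases hdot : c = '.'
      · subst hdot
        have hst : bStep .start '.' = .dotOnly := by
          simp [bStep, show PySem.Chars.isdigit '.' = false from by decide]
        have hpd : pvDigits ('.' :: rest) = (0, 0, '.' :: rest) := by
          simp [pvDigits, show PySem.Chars.isdigit '.' = false from by decide]
        simp only [List.foldl, hst]
        cases rest with
        | nil =>
          simp [bFinish, pvBody, pvDigits,
                show PySem.Chars.isdigit '.' = false from by decide]
        | cons d r =>
          by_cases hd : PySem.Chars.isdigit d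
          · have hst2 : bStep .dotOnly d = .frac (d.toNat - 48) 1 := by simp [bStep, hd]
            have hf := frac_eq r (d.toNat - 48) 1 0 0
            rw [show (0 : Nat) * 10 ^ 1 + (d.toNat - 48) = d.toNat - 48 from by ring,
                Nat.zero_add] at hf
            simp only [List.foldl, hst2]
            rw [hf]
            have hc := pvDigRun_cnt r (d.toNat - 48) 1
            rcases hx : pvDigRun r (d.toNat - 48) 1 with ⟨v, t, r2⟩
            rw [hx] at hc
            have ht : ¬ t = 0 := by norm_num at hc; omega
            have hpd2 : pvDigits (d :: r) = (v, t, r2) := by simp [pvDigits, hd, hx]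
            simp only [pvBody, hpd, hpd2]
            simp [ht]
          · have hst2 : bStep .dotOnly d = .fail := by simp [bStep, hd]
            have hpd2 : pvDigits (d :: r) = (0, 0, d :: r) := by simp [pvDigits, hd]
            simp only [List.foldl, hst2, foldl_bStep_fail]
            simp [pvBody, hpd, hpd2, bFinish]
      · have hst : bStep .start c = .fail := by simp [bStep, h, hdot]
        have hpd : pvDigits (c :: rest) = (0, 0, c :: rest) := by simp [pvDigits, h]
        simp only [List.foldl, hst, foldl_bStep_fail]
        simp only [pvBody, hpd]
        split
        · simp_all
        · simp [bFinish]

lemma bSigned_eq (neg : Bool) (body : List Char) :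
    bSigned neg body =
      (if pvLowerEq body ['i','n','f'] || pvLowerEq body ['i','n','f','i','n','i','t','y'] then
        some (.inf neg)
      else if pvLowerEq body ['n','a','n'] then some PVFloat.nan
      else
        match pvBody body with
        | some (m, e) => some (.finite ((if neg then -1 else 1) * (m : Int)) e)
        | none => none) := by
  have hsgn : ∀ m : Nat, (if neg then -(m : Int) else (m : Int)) = (if neg then -1 else 1) * (m : Int) := by
    intro m; cases neg <;> simp
  have hl : PySem.Chars.lower body = body.map PySem.Chars.lowerChar := by
    simp [PySem.Chars.lower]
  have key : ∀ t : List Char, (pvLowerEq body t = true) ↔ (PySem.Chars.lower body = t) := by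
    intro t
    simp only [pvLowerEq, hl, beq_iff_eq]
  unfold bSigned
  rw [← body_eq]
  by_cases h1 : PySem.Chars.lower body = ['i','n','f'] ∨
      PySem.Chars.lower body = ['i','n','f','i','n','i','t','y']
  · have hb : (pvLowerEq body ['i','n','f'] || pvLowerEq body ['i','n','f','i','n','i','t','y']) = true := by
      rcases h1 with h | h
      · simp [(key _).mpr h]
      · simp [(key _).mpr h]
    rw [if_pos h1, if_pos hb]
  · have hb : ¬ (pvLowerEq body ['i','n','f'] || pvLowerEq body ['i','n','f','i','n','i','t','y']) = true := by
      simp only [Bool.or_eq_true, key]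
      exact h1
    by_cases h2 : PySem.Chars.lower body = ['n','a','n']
    · have hb2 : pvLowerEq body ['n','a','n'] = true := (key _).mpr h2
      rw [if_neg h1, if_neg hb, if_pos h2, if_pos hb2]
    · have hb2 : ¬ pvLowerEq body ['n','a','n'] = true := by
        simp only [key]; exact h2
      rw [if_neg h1, if_neg hb, if_neg h2, if_neg hb2]
      rcases bFinish (body.foldl bStep .start) with _ | ⟨m, e⟩
      · rfl
      · cases neg <;> simp

lemma bParse_eq (s : List Char) : bParse s = pvParseFloat s := by
  unfold bParse pvParseFloat
  rcases PySem.Chars.strip s with _ | ⟨c, r⟩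
  · simp [bSigned_eq]
  · by_cases hp : c = '+'
    · subst hp; simp [bSigned_eq]
    · by_cases hm : c = '-'
      · subst hm; simp [bSigned_eq]
      · rcases c with ⟨cv, hcv⟩
        simp_all [bSigned_eq]

lemma bPct_eq (v : PVFloat) : bPct v = pvIsPct (some v) := by
  rcases v with neg | _ | ⟨m, e⟩
  · rfl
  · rfl
  · by_cases he : 0 ≤ e
    · simp [bPct, pvIsPct, he, show ¬ e < 0 by omega]
    · simp [bPct, pvIsPct, he, show e < 0 by omega]
      rfl

-- A's nested-if answer as a function of the three incoming flags
def gftRhs (f : List String) (ints bins pcts : Bool) : String :=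
  if ¬ (f.all fun o => is_number o) then "categorical"
  else if ints && (f.all fun o => is_integer o) then
    (if bins && (f.all fun o => is_binary_integer o) then "categorical" else "poisson")
  else if pcts && (f.all fun o => is_percentage o) then "logit-normal" else "gaussian"

lemma bLoop_eq (f : List String) (ints bins pcts : Bool) :
    bLoop f ints bins pcts = gftRhs f ints bins pcts := by
  induction f generalizing ints bins pcts with
  | nil => simp [bLoop, gftRhs]
  | cons o rest ih =>
    simp only [bLoop, bParse_eq]
    rcases hv : pvParseFloat o.toList with _ | v
    · simp [gftRhs, is_number, hv]
    · have hnum : is_number o = true := by simp [is_number, hv]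
      have hpct : is_percentage o = bPct v := by rw [bPct_eq]; simp [is_percentage, hv]
      dsimp only
      rcases hi : PySem.Int.ofStr? o with _ | n
      · have hint : is_integer o = false := by simp [is_integer, hi]
        dsimp only
        rw [ih]
        simp [gftRhs, hnum, hint, hpct, Bool.and_assoc]
      · have hint : is_integer o = true := by simp [is_integer, hi]
        have hbin : is_binary_integer o = (n == 0 || n == 1) := by
          simp [is_binary_integer, hi]
          rw [Bool.beq_eq_decide_eq, Bool.beq_eq_decide_eq]
        dsimp only
        rw [ih]
        simp [gftRhs, hnum, hint, hbin, hpct, Bool.and_assoc]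

-- ===== VERDICT (by name: the statement is the Claim_ definition above) =====
theorem guess_feature_type_spec : Claim_equal_guess_feature_type := by
  intro f _
  unfold Spec_guess_feature_type guess_feature_type guess_feature_type_alt
  rw [bLoop_eq]
  unfold gftRhs
  simp only [Bool.true_and]
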